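-- pv_equiv track=rewrite | github.com/heldergomes/algorithm | reach_building_with_sunview/algorithm.py | reach_building_with_sunview
-- ===== SOURCE A (Python) =====
-- def reach_building_with_sunview(param):
--     index = len(param) - 1
--     biggest_building = -1
--     sun_view_counter = 0
--
--     for _ in range(len(param)):
--         if param[index] > biggest_building:
--             biggest_building = param[index]
--             sun_view_counter += 1
--         index -= 1
--
--     return sun_view_counter
-- ===== SOURCE B (Python) =====
-- def reach_building_with_sunview(param):
--     # suffix_max built right-to-left with baseline -1, then a separate counting pass
--     suffix_max = [-1] * (len(param) + 1)
--     for i in range(len(param) - 1, -1, -1):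
--         suffix_max[i] = max(param[i], suffix_max[i + 1])
--     return sum(1 for x, m in zip(param, suffix_max[1:]) if x > m)
-- ===== Notes on version B (the rewrite author's own statement) =====
-- stated objective: alternative
-- what changed: Replaces the single reverse loop that threads a running max and a counter together by a precomputed suffix-maximum table (baseline -1) followed by a separate counting pass comparing each element with the suffix max to its right.
import Mathlib
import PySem

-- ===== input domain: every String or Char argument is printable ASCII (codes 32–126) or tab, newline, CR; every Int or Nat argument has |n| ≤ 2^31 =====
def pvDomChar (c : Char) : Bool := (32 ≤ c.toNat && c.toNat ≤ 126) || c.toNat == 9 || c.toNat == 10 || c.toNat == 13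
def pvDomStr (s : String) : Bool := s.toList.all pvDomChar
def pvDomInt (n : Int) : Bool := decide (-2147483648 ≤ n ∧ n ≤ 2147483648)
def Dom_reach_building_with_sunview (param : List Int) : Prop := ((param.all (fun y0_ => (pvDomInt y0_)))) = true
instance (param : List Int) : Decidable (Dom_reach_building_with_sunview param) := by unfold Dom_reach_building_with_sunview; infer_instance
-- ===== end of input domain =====

-- B replaces A's single reverse loop (running max + counter together) by a suffix-maximum
-- table built right-to-left with baseline -1 plus a separate counting pass (objective: alternative).

-- ===== PORT A =====
-- literal port of A's loop: index walks from len-1 down to 0; the `none` branch of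
-- pyGet? is unreachable since the index is always in range, and keeps the port total.
def reach_building_with_sunview (param : List Int) : Int :=
  let n : Int := (param.length : Int)
  let s := (PySem.List.pyRange 0 n 1).foldl
    (fun (s : Int × Int × Int) _ =>
      match PySem.List.pyGet? param s.1 with
      | some v =>
          if v > s.2.1 then (s.1 - 1, v, s.2.2 + 1) else (s.1 - 1, s.2.1, s.2.2)
      | none => (s.1 - 1, s.2.1, s.2.2))
    (n - 1, -1, 0)
  s.2.2

-- ===== PORT B =====
-- suffix-maximum table: entry i is max(param[i], entry i+1), terminal entry is -1
def pvSuffixMax : List Int → List Int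
  | [] => [-1]
  | x :: xs => max x ((pvSuffixMax xs).headD (-1)) :: pvSuffixMax xs

def reach_building_with_sunview_alt (param : List Int) : Int :=
  let sm := pvSuffixMax param
  ((param.zip sm.tail).countP (fun p => p.1 > p.2) : Int)

-- ===== PRECONDITION & SPEC =====
def Spec_reach_building_with_sunview (param : List Int) (out : Int) : Prop := out = reach_building_with_sunview_alt param
instance (param : List Int) (out : Int) : Decidable (Spec_reach_building_with_sunview param out) := by unfold Spec_reach_building_with_sunview; infer_instance

-- ===== CLAIM (what is proved, stated in full; the proofs are below) =====
def Claim_equal_reach_building_with_sunview : Prop := ∀ (param : List Int), Dom_reach_building_with_sunview param → Spec_reach_building_with_sunview param (reach_building_with_sunview param)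

-- ===== LEMMAS AND PROOFS =====

-- one iteration of A's loop body
def pvStep (param : List Int) (s : Int × Int × Int) : Int × Int × Int :=
  match PySem.List.pyGet? param s.1 with
  | some v =>
      if v > s.2.1 then (s.1 - 1, v, s.2.2 + 1) else (s.1 - 1, s.2.1, s.2.2)
  | none => (s.1 - 1, s.2.1, s.2.2)

-- A's loop as an iteration count
def pvIter (param : List Int) : Nat → (Int × Int × Int) → Int × Int × Int
  | 0, s => s
  | k + 1, s => pvIter param k (pvStep param s)

-- reference right-to-left running max/counter
def pvG : List Int → Int → Int × Int
  | [], b => (b, 0)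
  | x :: xs, b =>
    let p := pvG xs b
    if x > p.1 then (x, p.2 + 1) else (p.1, p.2)

lemma pvFoldl_eq_iter (param : List Int) (l : List Int) (s : Int × Int × Int) :
    l.foldl (fun (s : Int × Int × Int) _ =>
      match PySem.List.pyGet? param s.1 with
      | some v =>
          if v > s.2.1 then (s.1 - 1, v, s.2.2 + 1) else (s.1 - 1, s.2.1, s.2.2)
      | none => (s.1 - 1, s.2.1, s.2.2)) s = pvIter param l.length s := by
  induction l generalizing s with
  | nil => rfl
  | cons a l ih => simpa [pvIter, pvStep] using ih (pvStep param s)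

lemma pvIter_succ_comm (param : List Int) (k : Nat) (s : Int × Int × Int) :
    pvIter param (k + 1) s = pvStep param (pvIter param k s) := by
  induction k generalizing s with
  | zero => rfl
  | succ k ih => simpa [pvIter] using ih (pvStep param s)

lemma pvStep_cons_shift (x : Int) (xs : List Int) (i b c : Int) (hi : 0 ≤ i) :
    pvStep (x :: xs) (i + 1, b, c) =
      ((pvStep xs (i, b, c)).1 + 1, (pvStep xs (i, b, c)).2) := by
  have h : PySem.List.pyGet? (x :: xs) (i + 1) = PySem.List.pyGet? xs i := by
    lift i to ℕ using hi
    exact PySem.List.pyGet?_cons_succ x xs i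
  simp only [pvStep, h]
  rcases PySem.List.pyGet? xs i with _ | v
  · simp
  · simp; split <;> simp [add_comm]

lemma pvIter_cons_shift (x : Int) (xs : List Int) (k : Nat) (i b c : Int)
    (hk : (k : Int) ≤ i + 1) :
    pvIter (x :: xs) k (i + 1, b, c) =
      ((pvIter xs k (i, b, c)).1 + 1, (pvIter xs k (i, b, c)).2) := by
  induction k generalizing i b c with
  | zero => rfl
  | succ k ih =>
    have hi : 0 ≤ i := by push_cast at hk; omega
    have hstep := pvStep_cons_shift x xs i b c hi
    have h1 : (pvStep xs (i, b, c)).1 = i - 1 := by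
      simp only [pvStep]; rcases PySem.List.pyGet? xs i with _ | v
      · simp
      · simp; split <;> simp
    rcases e : pvStep xs (i, b, c) with ⟨i', b', c'⟩
    rw [e] at h1 hstep
    simp only at h1
    subst h1
    simp only [pvIter, hstep, e]
    exact ih b' c' (i := i - 1) (by push_cast at hk ⊢; omega)

lemma pvIter_eq_g (param : List Int) (b c : Int) :
    pvIter param param.length ((param.length : Int) - 1, b, c) =
      (-1, (pvG param b).1, c + (pvG param b).2) := by
  induction param generalizing c with
  | nil => simp [pvIter, pvG]
  | cons x xs ih =>
    rw [show (x :: xs).length = xs.length + 1 from rfl, pvIter_succ_comm]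
    rw [show ((xs.length + 1 : Nat) : Int) - 1 = ((xs.length : Int) - 1) + 1 from by
      push_cast; ring]
    rw [pvIter_cons_shift x xs xs.length ((xs.length : Int) - 1) b c (by omega), ih c]
    simp only [pvStep]
    rw [show (-1 : Int) + 1 = 0 from by ring]
    simp only [PySem.List.pyGet?_zero_cons, pvG]
    split <;> simp [add_assoc]

lemma pvSuffixMax_ne_nil (xs : List Int) : pvSuffixMax xs ≠ [] := by
  cases xs <;> simp [pvSuffixMax]

lemma pvAlt_eq_g (xs : List Int) :
    reach_building_with_sunview_alt xs = (pvG xs (-1)).2 ∧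
      (pvSuffixMax xs).headD (-1) = (pvG xs (-1)).1 := by
  induction xs with
  | nil => simp [reach_building_with_sunview_alt, pvSuffixMax, pvG]
  | cons x xs ih =>
    obtain ⟨ih1, ih2⟩ := ih
    constructor
    · simp only [reach_building_with_sunview_alt, pvSuffixMax, List.tail_cons]
      obtain ⟨h, t, hht⟩ : ∃ h t, pvSuffixMax xs = h :: t := by
        rcases e : pvSuffixMax xs with _ | ⟨h, t⟩
        · exact absurd e (pvSuffixMax_ne_nil xs)
        · exact ⟨h, t, rfl⟩
      rw [hht] at ih2 ⊢
      simp only [List.headD_cons] at ih2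
      simp only [List.zip_cons_cons, List.countP_cons]
      simp only [reach_building_with_sunview_alt] at ih1
      rw [hht] at ih1
      simp only [List.tail_cons] at ih1
      simp only [pvG]
      rw [ih2]
      by_cases hgt : x > (pvG xs (-1)).1 <;>
        simp [hgt, ← ih1]
    · simp only [pvSuffixMax, List.headD_cons, pvG]
      rw [ih2]
      split_ifs with hgt <;> omega

-- ===== VERDICT (by name: the statement is the Claim_ definition above) =====
theorem reach_building_with_sunview_spec : Claim_equal_reach_building_with_sunview := by
  intro param _
  show reach_building_with_sunview param = reach_building_with_sunview_alt param
  rw [(pvAlt_eq_g param).1]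
  simp only [reach_building_with_sunview]
  rw [pvFoldl_eq_iter, PySem.List.length_pyRange_one]
  simpa using congrArg (fun s => s.2.2) (pvIter_eq_g param (-1) 0)
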